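-- pv_equiv track=rewrite | github.com/MinoBibawy/tictactoe_5x5_python | Tic Tac Toe.py | check_row
-- ===== SOURCE A (Python) =====
-- board = [
--   ["-", "-", "-", "-", "-"],
--   ["-", "-", "-", "-", "-"],
--   ["-", "-", "-", "-", "-"],
--   ["-", "-", "-", "-", "-"],
--   ["-", "-", "-", "-", "-"]
-- ]
--
-- user = True
--
-- def check_row(user, board):
--   rowpoints = 0
--   for row in board:
--     maxl = 0
--     l = 0
--     for slot in row:
--       if slot == user:
--          l = l+1
--          if l > maxl:
--             maxl = l
--       else:
--          l = 0
--     if maxl == 3: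
--       rowpoints = rowpoints + 2
--     if maxl == 4:
--       rowpoints = rowpoints + 10
--     if maxl == 5:
--       rowpoints = rowpoints + 50
--   return rowpoints
-- ===== SOURCE B (Python) =====
-- def check_row(user, board):
--     # Threshold testing: instead of computing the longest run, test for each score
--     # threshold k whether some window of k consecutive slots is all `user`; the
--     # longest run is exactly k iff a k-window exists but no (k+1)-window does.
--     def has_run(row, k):
--         for i in range(len(row) - k + 1):
--             if all(s == user for s in row[i:i + k]):
--                 return True
--         return False
--
--     total = 0
--     for row in board:
--         for k, pts in ((3, 2), (4, 10), (5, 50)):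
--             if has_run(row, k) and not has_run(row, k + 1):
--                 total += pts
--     return total
-- ===== Notes on version B (the rewrite author's own statement) =====
-- stated objective: alternative
-- what changed: B never computes the longest run: for each threshold k in (3,4,5) it runs a sliding-window existence test (is some window of k consecutive slots all equal to user?) and awards k's points exactly when a k-window exists but no (k+1)-window, replacing A's single scan that maintains a streak counter and a running maximum mapped through three ifs.
import Mathlib
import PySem

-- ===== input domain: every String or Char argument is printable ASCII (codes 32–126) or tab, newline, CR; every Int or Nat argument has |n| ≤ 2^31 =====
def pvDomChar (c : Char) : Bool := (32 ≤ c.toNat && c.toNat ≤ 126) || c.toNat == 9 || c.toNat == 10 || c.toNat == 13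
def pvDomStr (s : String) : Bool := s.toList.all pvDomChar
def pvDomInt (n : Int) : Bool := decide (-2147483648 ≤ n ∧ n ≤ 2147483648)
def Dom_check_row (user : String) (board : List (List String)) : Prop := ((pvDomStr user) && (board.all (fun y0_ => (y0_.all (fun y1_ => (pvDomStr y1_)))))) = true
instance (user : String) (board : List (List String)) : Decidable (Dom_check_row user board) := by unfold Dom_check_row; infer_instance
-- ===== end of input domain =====

-- B replaces A's streak-counter/running-max scan by per-threshold sliding-window existence
-- tests (a k-window of user exists but no (k+1)-window) — objective: alternative algorithm.


-- ===== PORT A =====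
def check_row (user : String) (board : List (List String)) : Int :=
  board.foldl (fun rowpoints row =>
    let st := row.foldl (fun (st : Int × Int) slot =>
      if slot == user then
        let l := st.2 + 1
        (if l > st.1 then l else st.1, l)
      else
        (st.1, 0)) (0, 0)
    let maxl := st.1
    let rp := if maxl == 3 then rowpoints + 2 else rowpoints
    let rp := if maxl == 4 then rp + 10 else rp
    let rp := if maxl == 5 then rp + 50 else rp
    rp) 0

-- ===== PORT B =====
-- has_run(row, k): for i in range(len(row)-k+1): if all(s == user for s in row[i:i+k]): return True
def pvHasRun (user : String) (row : List String) (k : Int) : Bool :=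
  (PySem.List.pyRange 0 ((row.length : Int) - k + 1) 1).any
    (fun i => (PySem.List.slice row (some i) (some (i + k))).all (fun s => s == user))

def check_row_alt (user : String) (board : List (List String)) : Int :=
  board.foldl (fun total row =>
    [((3 : Int), (2 : Int)), (4, 10), (5, 50)].foldl (fun total kp =>
      if pvHasRun user row kp.1 && !pvHasRun user row (kp.1 + 1) then total + kp.2
      else total) total) 0

-- ===== PRECONDITION & SPEC =====
def Spec_check_row (user : String) (board : List (List String)) (out : Int) : Prop := out = check_row_alt user board
instance (user : String) (board : List (List String)) (out : Int) : Decidable (Spec_check_row user board out) := by unfold Spec_check_row; infer_instance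

-- ===== CLAIM (what is proved, stated in full; the proofs are below) =====
def Claim_equal_check_row : Prop := ∀ (user : String) (board : List (List String)), Dom_check_row user board → Spec_check_row user board (check_row user board)

-- ===== LEMMAS AND PROOFS =====

-- spec of A's per-row maximum: longest run of `user`, given current streak credit `l`
def pvH (user : String) (l : Int) : List String → Int
  | [] => 0
  | s :: rest => if s == user then max (l + 1) (pvH user (l + 1) rest) else pvH user 0 rest

theorem pvH_nonneg (user : String) : ∀ (row : List String) (l : Int), 0 ≤ pvH user l row := by
  intro row
  induction row with
  | nil => intro l; simp [pvH]
  | cons s rest ih =>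
    intro l
    by_cases hs : (s == user) = true <;> simp [pvH, hs] <;>
      first
        | exact Or.inr (ih (l + 1))
        | exact ih 0

-- A's inner fold computes pvH (with running maximum m and streak l)
theorem pvH_inner (user : String) (row : List String) :
    ∀ m l : Int, 0 ≤ m → 0 ≤ l →
    (row.foldl (fun (st : Int × Int) slot =>
      if slot == user then
        let l := st.2 + 1
        (if l > st.1 then l else st.1, l)
      else
        (st.1, 0)) (m, l)).1 = max m (pvH user l row) := by
  induction row with
  | nil => intro m l hm _; simp [pvH]; omega
  | cons s rest ih =>
    intro m l hm hl
    by_cases hs : (s == user) = true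
    · simp only [List.foldl_cons, hs, if_true]
      rw [show ((if l + 1 > m then l + 1 else m, l + 1) : Int × Int)
            = (max m (l + 1), l + 1) by simp [max_def]; split_ifs <;> omega]
      rw [ih (max m (l + 1)) (l + 1) (by omega) (by omega)]
      rw [show pvH user l (s :: rest) = max (l + 1) (pvH user (l + 1) rest) by simp [pvH, hs]]
      omega
    · simp only [List.foldl_cons, hs, if_false, Bool.false_eq_true]
      rw [ih m 0 hm le_rfl]
      simp [pvH, hs]

theorem pvReplicate_prefix_mono (user : String) (j κ : Nat) (h : κ ≤ j) :
    List.replicate κ user <+: List.replicate j user := by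
  rw [show j = κ + (j - κ) by omega, List.replicate_add]
  exact List.prefix_append _ _

theorem pvRepl_cons (a : String) (j : Nat) (hj : 1 ≤ j) :
    List.replicate j a = a :: List.replicate (j - 1) a := by
  conv_lhs => rw [show j = (j - 1) + 1 by omega]
  rw [List.replicate_succ]

-- the credit-generalised equivalence: a run of length ≥ κ reachable with streak credit l
-- exists iff a κ-block is an infix, or a prefix block of length j tops up the credit
theorem pvH_runs (user : String) : ∀ (row : List String) (l : Int) (κ : Nat),
    0 ≤ l → 1 ≤ κ →
    ((κ : Int) ≤ pvH user l row ↔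
      (List.replicate κ user <:+: row ∨
        ∃ j : Nat, 1 ≤ j ∧ (κ : Int) ≤ l + j ∧ List.replicate j user <+: row)) := by
  intro row
  induction row with
  | nil =>
    intro l κ hl hκ
    constructor
    · intro h; exfalso; simp [pvH] at h; omega
    · rintro (h | ⟨j, hj, _, hp⟩)
      · have := h.length_le; simp at this; omega
      · have := hp.length_le; simp at this; omega
  | cons s t ih =>
    intro l κ hl hκ
    by_cases hs : (s == user) = true
    · have hsu : s = user := by simpa using hs
      subst hsu
      rw [show pvH s l (s :: t) = max (l + 1) (pvH s (l + 1) t) by simp [pvH]]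
      constructor
      · intro h
        rcases le_max_iff.mp h with h1 | h2
        · refine Or.inr ⟨1, le_rfl, by omega, ?_⟩
          rw [pvRepl_cons s 1 le_rfl]
          exact List.cons_prefix_cons.mpr ⟨rfl, by simp⟩
        · rcases (ih (l + 1) κ (by omega) hκ).mp h2 with hinf | ⟨j, hj, hle, hp⟩
          · exact Or.inl (hinf.trans (List.suffix_cons s t).isInfix)
          · refine Or.inr ⟨j + 1, by omega, by omega, ?_⟩
            rw [pvRepl_cons s (j + 1) (by omega), Nat.add_sub_cancel]
            exact List.cons_prefix_cons.mpr ⟨rfl, hp⟩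
      · rintro (hinf | ⟨j, hj, hle, hp⟩)
        · rcases List.infix_cons_iff.mp hinf with hpre | hinf'
          · -- the κ-block is a prefix of s :: t
            have hκt : List.replicate (κ - 1) s <+: t := by
              rw [pvRepl_cons s κ hκ] at hpre
              exact (List.cons_prefix_cons.mp hpre).2
            by_cases h1 : κ = 1
            · subst h1; apply le_max_of_le_left; omega
            · apply le_max_of_le_right
              exact (ih (l + 1) κ (by omega) hκ).mpr
                (Or.inr ⟨κ - 1, by omega, by omega, hκt⟩)
          · exact le_max_of_le_right ((ih (l + 1) κ (by omega) hκ).mpr (Or.inl hinf'))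
        · have hp' : List.replicate (j - 1) s <+: t := by
            rw [pvRepl_cons s j hj] at hp
            exact (List.cons_prefix_cons.mp hp).2
          by_cases h1 : j = 1
          · subst h1; apply le_max_of_le_left; omega
          · apply le_max_of_le_right
            exact (ih (l + 1) κ (by omega) hκ).mpr
              (Or.inr ⟨j - 1, by omega, by omega, hp'⟩)
    · rw [show pvH user l (s :: t) = pvH user 0 t by simp [pvH, hs]]
      have hne : ∀ j : Nat, 1 ≤ j → ¬ (List.replicate j user <+: s :: t) := by
        intro j hj hp
        rw [pvRepl_cons user j hj] at hp
        have := (List.cons_prefix_cons.mp hp).1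
        simp [this] at hs
      rw [ih 0 κ le_rfl hκ]
      constructor
      · rintro (hinf | ⟨j, hj, hle, hp⟩)
        · exact Or.inl (hinf.trans (List.suffix_cons s t).isInfix)
        · refine Or.inl ?_
          have : List.replicate κ user <+: t := by
            refine List.IsPrefix.trans ?_ hp
            exact pvReplicate_prefix_mono user j κ (by omega)
          exact this.isInfix.trans (List.suffix_cons s t).isInfix
      · rintro (hinf | ⟨j, hj, hle, hp⟩)
        · rcases List.infix_cons_iff.mp hinf with hpre | hinf'
          · exact absurd hpre (hne κ hκ)
          · exact Or.inl hinf'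
        · exact absurd hp (hne j hj)

theorem pvH_infix (user : String) (row : List String) (κ : Nat) (hκ : 1 ≤ κ) :
    (κ : Int) ≤ pvH user 0 row ↔ List.replicate κ user <:+: row := by
  rw [pvH_runs user row 0 κ le_rfl hκ]
  constructor
  · rintro (h | ⟨j, hj, hle, hp⟩)
    · exact h
    · exact ((pvReplicate_prefix_mono user j κ (by omega)).trans hp).isInfix
  · exact Or.inl

-- B's window scan decides exactly "some κ-window is all user", i.e. the infix condition
theorem pvHasRun_iff (user : String) (row : List String) (κ : Nat) (hκ : 1 ≤ κ) :
    pvHasRun user row (κ : Int) = true ↔ List.replicate κ user <:+: row := by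
  unfold pvHasRun
  rw [List.any_eq_true]
  constructor
  · rintro ⟨i, hi, hall⟩
    rw [PySem.List.mem_pyRange_one] at hi
    obtain ⟨hi0, hilt⟩ := hi
    obtain ⟨j, rfl⟩ : ∃ j : Nat, i = (j : Int) := ⟨i.toNat, (Int.toNat_of_nonneg hi0).symm⟩
    have hjκ : j + κ ≤ row.length := by omega
    rw [PySem.List.slice_natCast_add] at hall
    have hlen : ((row.drop j).take κ).length = κ := by
      rw [List.length_take, List.length_drop]; omega
    have hrep : (row.drop j).take κ = List.replicate κ user := by
      rw [List.eq_replicate_iff]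
      refine ⟨hlen, fun b hb => ?_⟩
      have := List.all_eq_true.mp hall b hb
      simpa using this
    rw [← hrep]
    exact ((List.take_prefix κ (row.drop j)).isInfix).trans (List.drop_suffix j row).isInfix
  · intro hinf
    obtain ⟨pre, post, hrow⟩ := hinf
    refine ⟨(pre.length : Int), ?_, ?_⟩
    · rw [PySem.List.mem_pyRange_one]
      have : pre.length + κ + post.length = row.length := by
        rw [← hrow]; simp; omega
      constructor
      · positivity
      · omega
    · rw [PySem.List.slice_natCast_add, ← hrow, List.append_assoc, List.drop_left]
      rw [List.take_left' (by simp)]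
      simp

theorem pvHasRun_eq (user : String) (row : List String) (κ : Nat) (hκ : 1 ≤ κ) :
    pvHasRun user row (κ : Int) = decide ((κ : Int) ≤ pvH user 0 row) := by
  have h := (pvHasRun_iff user row κ hκ).trans (pvH_infix user row κ hκ).symm
  by_cases hp : (κ : Int) ≤ pvH user 0 row
  · simp [hp, h.mpr hp]
  · rcases hb : pvHasRun user row (κ : Int) with _ | _
    · simp [hp]
    · exact absurd (h.mp hb) hp

theorem pvScore_row (user : String) (row : List String) (rp : Int) :
    (let st := row.foldl (fun (st : Int × Int) slot =>
        if slot == user then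
          let l := st.2 + 1
          (if l > st.1 then l else st.1, l)
        else
          (st.1, 0)) (0, 0)
      let maxl := st.1
      let a := if maxl == 3 then rp + 2 else rp
      let b := if maxl == 4 then a + 10 else a
      if maxl == 5 then b + 50 else b)
    = [((3 : Int), (2 : Int)), (4, 10), (5, 50)].foldl (fun total kp =>
        if pvHasRun user row kp.1 && !pvHasRun user row (kp.1 + 1) then total + kp.2
        else total) rp := by
  have e3 := pvHasRun_eq user row 3 (by norm_num)
  have e4 := pvHasRun_eq user row 4 (by norm_num)
  have e5 := pvHasRun_eq user row 5 (by norm_num)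
  have e6 := pvHasRun_eq user row 6 (by norm_num)
  norm_num at e3 e4 e5 e6
  have hmax : (row.foldl (fun (st : Int × Int) slot =>
      if slot == user then
        let l := st.2 + 1
        (if l > st.1 then l else st.1, l)
      else
        (st.1, 0)) (0, 0)).1 = pvH user 0 row := by
    rw [pvH_inner user row 0 0 le_rfl le_rfl]
    have := pvH_nonneg user row 0
    omega
  simp only [List.foldl_cons, List.foldl_nil]
  rw [hmax]
  norm_num [e3, e4, e5, e6]
  split_ifs <;> omega

theorem pvFoldl_same {α β : Type} (f g : β → α → β) (h : ∀ b a, f b a = g b a) :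
    ∀ (L : List α) (b : β), L.foldl f b = L.foldl g b := by
  intro L
  induction L with
  | nil => intro b; rfl
  | cons x L ih => intro b; simp only [List.foldl_cons, h]; exact ih (g b x)

-- ===== VERDICT (by name: the statement is the Claim_ definition above) =====
theorem check_row_spec : Claim_equal_check_row := by
  intro user board _
  unfold Spec_check_row check_row check_row_alt
  exact pvFoldl_same _ _ (fun rp row => pvScore_row user row rp) board 0
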